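-- pv_equiv track=rewrite | github.com/A-Baji/ClipMorph | ClipMorph/ffmpeg/__init__.py | _parse_ffmpeg_error
-- ===== SOURCE A (Python) =====
-- def _parse_ffmpeg_error(stderr: str) -> str:
--     """Extract meaningful error message from FFmpeg stderr."""
--     if not stderr:
--         return "Unknown error (no error output)"
--
--     lines = stderr.strip().split('\n')
--
--     # Common error patterns to look for
--     error_patterns = [
--         "No such file or directory",
--         "Invalid data found",
--         "does not contain any stream",
--         "Permission denied",
--         "Disk full",
--         "could not find codec",
--         "Invalid argument",
--     ]
--
--     # Look for lines containing error patterns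
--     for line in reversed(lines):
--         line_lower = line.lower()
--         if any(pattern.lower() in line_lower
--                for pattern in error_patterns):
--             return line.strip()
--
--     # Look for lines starting with error indicators
--     for line in reversed(lines):
--         if any(
--                 line.startswith(prefix)
--                 for prefix in ['Error:', '[error]', 'ffmpeg:']):
--             return line.strip()
--
--     # Fall back to last non-empty line
--     for line in reversed(lines):
--         if line.strip():
--             return line.strip()
--
--     return "Unknown FFmpeg error"
-- ===== SOURCE B (Python) =====
-- def _parse_ffmpeg_error(stderr: str) -> str:
--     """Extract meaningful error message from FFmpeg stderr."""
--     if not stderr: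
--         return "Unknown error (no error output)"
--
--     patterns_lower = [
--         "no such file or directory",
--         "invalid data found",
--         "does not contain any stream",
--         "permission denied",
--         "disk full",
--         "could not find codec",
--         "invalid argument",
--     ]
--     prefixes = ('Error:', '[error]', 'ffmpeg:')
--
--     # One forward pass; later lines overwrite, so each candidate ends up
--     # holding the last matching line of its category.
--     best_pattern = best_prefix = best_nonempty = None
--     for line in stderr.strip().split('\n'):
--         stripped = line.strip()
--         lowered = line.lower()
--         if any(p in lowered for p in patterns_lower):
--             best_pattern = stripped
--         if line.startswith(prefixes):
--             best_prefix = stripped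
--         if stripped:
--             best_nonempty = stripped
--
--     if best_pattern is not None:
--         return best_pattern
--     if best_prefix is not None:
--         return best_prefix
--     if best_nonempty is not None:
--         return best_nonempty
--     return "Unknown FFmpeg error"
-- ===== Notes on version B (the rewrite author's own statement) =====
-- stated objective: alternative
-- what changed: Replaces A's three separate backward scans over the line list by a single forward pass that maintains one last-match candidate per category (pattern / prefix / non-empty) and picks among them at the end; the pattern list is pre-lowercased.
import Mathlib
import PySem

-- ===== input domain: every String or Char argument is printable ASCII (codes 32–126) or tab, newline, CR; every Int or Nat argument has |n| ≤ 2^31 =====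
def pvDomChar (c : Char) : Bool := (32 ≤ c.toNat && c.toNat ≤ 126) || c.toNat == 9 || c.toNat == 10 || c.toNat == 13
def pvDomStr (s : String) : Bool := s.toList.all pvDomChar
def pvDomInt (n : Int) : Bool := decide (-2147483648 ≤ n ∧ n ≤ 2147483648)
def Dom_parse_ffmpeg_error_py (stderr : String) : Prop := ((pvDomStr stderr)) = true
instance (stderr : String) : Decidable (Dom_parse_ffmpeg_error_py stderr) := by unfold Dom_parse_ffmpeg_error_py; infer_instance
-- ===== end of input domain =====

-- B replaces A's three backward scans by one forward pass keeping a last-match candidate per category (objective: alternative decomposition).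

-- ===== PORT A =====
def pvPatterns : List String :=
  ["No such file or directory", "Invalid data found", "does not contain any stream",
   "Permission denied", "Disk full", "could not find codec", "Invalid argument"]

def pvPrefixes : List String := ["Error:", "[error]", "ffmpeg:"]

-- first backward loop: lines containing an error pattern (case-insensitive)
def pvLoopPat : List String → Option String
  | [] => none
  | line :: rest =>
    if pvPatterns.any (fun pat => PySem.Str.isIn (PySem.Str.lower pat) (PySem.Str.lower line)) then
      some (PySem.Str.strip line)
    else pvLoopPat rest

-- second backward loop: lines starting with an error prefix
def pvLoopPre : List String → Option String
  | [] => none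
  | line :: rest =>
    if pvPrefixes.any (fun pre => PySem.Str.startswith line pre) then
      some (PySem.Str.strip line)
    else pvLoopPre rest

-- third backward loop: last non-empty line
def pvLoopNe : List String → Option String
  | [] => none
  | line :: rest =>
    if PySem.Str.strip line ≠ "" then some (PySem.Str.strip line) else pvLoopNe rest

def parse_ffmpeg_error_py (stderr : String) : String :=
  if stderr = "" then "Unknown error (no error output)"
  else
    let lines := (PySem.Str.split? (PySem.Str.strip stderr) "\n").getD []
    match pvLoopPat lines.reverse with
    | some r => r
    | none =>
      match pvLoopPre lines.reverse with
      | some r => r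
      | none =>
        match pvLoopNe lines.reverse with
        | some r => r
        | none => "Unknown FFmpeg error"

-- ===== PORT B =====
def pvPatternsLower : List String :=
  ["no such file or directory", "invalid data found", "does not contain any stream",
   "permission denied", "disk full", "could not find codec", "invalid argument"]

-- one forward step: overwrite each candidate when its category matches
def pvStep (best : Option String × Option String × Option String) (line : String) :
    Option String × Option String × Option String :=
  let stripped := PySem.Str.strip line
  let lowered := PySem.Str.lower line
  (if pvPatternsLower.any (fun p => PySem.Str.isIn p lowered) then some stripped else best.1,
   if pvPrefixes.any (fun pre => PySem.Str.startswith line pre) then some stripped else best.2.1,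
   if stripped ≠ "" then some stripped else best.2.2)

def parse_ffmpeg_error_py_alt (stderr : String) : String :=
  if stderr = "" then "Unknown error (no error output)"
  else
    let lines := (PySem.Str.split? (PySem.Str.strip stderr) "\n").getD []
    let best := lines.foldl pvStep (none, none, none)
    (((best.1).orElse fun _ => best.2.1).orElse fun _ => best.2.2).getD "Unknown FFmpeg error"

-- ===== PRECONDITION & SPEC =====
def Spec_parse_ffmpeg_error_py (stderr : String) (out : String) : Prop := out = parse_ffmpeg_error_py_alt stderr
instance (stderr : String) (out : String) : Decidable (Spec_parse_ffmpeg_error_py stderr out) := by unfold Spec_parse_ffmpeg_error_py; infer_instance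

-- ===== CLAIM (what is proved, stated in full; the proofs are below) =====
def Claim_equal_parse_ffmpeg_error_py : Prop := ∀ (stderr : String), Dom_parse_ffmpeg_error_py stderr → Spec_parse_ffmpeg_error_py stderr (parse_ffmpeg_error_py stderr)

-- ===== LEMMAS AND PROOFS =====

theorem patterns_lower_eq : pvPatterns.map PySem.Str.lower = pvPatternsLower := by decide

theorem loopPat_append (a b : List String) :
    pvLoopPat (a ++ b) = (pvLoopPat a).orElse (fun _ => pvLoopPat b) := by
  induction a with
  | nil => simp [pvLoopPat]
  | cons x xs ih => simp only [List.cons_append, pvLoopPat]; split_ifs <;> simp [ih]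

theorem loopPre_append (a b : List String) :
    pvLoopPre (a ++ b) = (pvLoopPre a).orElse (fun _ => pvLoopPre b) := by
  induction a with
  | nil => simp [pvLoopPre]
  | cons x xs ih => simp only [List.cons_append, pvLoopPre]; split_ifs <;> simp [ih]

theorem loopNe_append (a b : List String) :
    pvLoopNe (a ++ b) = (pvLoopNe a).orElse (fun _ => pvLoopNe b) := by
  induction a with
  | nil => simp [pvLoopNe]
  | cons x xs ih => simp only [List.cons_append, pvLoopNe]; split_ifs <;> simp [ih]

theorem pred_pat_eq (line : String) :
    (pvPatternsLower.any (fun p => PySem.Str.isIn p (PySem.Str.lower line)))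
      = pvPatterns.any (fun pat => PySem.Str.isIn (PySem.Str.lower pat) (PySem.Str.lower line)) := by
  rw [← patterns_lower_eq, List.any_map]
  rfl

theorem fold_eq (l : List String) (s : Option String × Option String × Option String) :
    l.foldl pvStep s =
      ((pvLoopPat l.reverse).orElse (fun _ => s.1),
       (pvLoopPre l.reverse).orElse (fun _ => s.2.1),
       (pvLoopNe l.reverse).orElse (fun _ => s.2.2)) := by
  induction l generalizing s with
  | nil => simp [pvLoopPat, pvLoopPre, pvLoopNe]
  | cons x xs ih =>
    simp only [List.foldl_cons, List.reverse_cons, ih, loopPat_append, loopPre_append,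
      loopNe_append, pvStep, pred_pat_eq]
    cases hp : pvLoopPat xs.reverse <;> cases hq : pvLoopPre xs.reverse <;>
      cases hr : pvLoopNe xs.reverse <;>
      simp [pvLoopPat, pvLoopPre, pvLoopNe, Option.orElse] <;> split_ifs <;> simp

-- ===== VERDICT (by name: the statement is the Claim_ definition above) =====
theorem parse_ffmpeg_error_py_spec : Claim_equal_parse_ffmpeg_error_py := by
  intro stderr _
  unfold Spec_parse_ffmpeg_error_py parse_ffmpeg_error_py parse_ffmpeg_error_py_alt
  by_cases h : stderr = ""
  · simp [h]
  · simp only [h, if_false]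
    rw [fold_eq]
    cases hp : pvLoopPat ((PySem.Str.split? (PySem.Str.strip stderr) "\n").getD []).reverse <;>
      cases hq : pvLoopPre ((PySem.Str.split? (PySem.Str.strip stderr) "\n").getD []).reverse <;>
      cases hr : pvLoopNe ((PySem.Str.split? (PySem.Str.strip stderr) "\n").getD []).reverse <;>
      simp [Option.orElse]
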